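-- pv_equiv track=rewrite | github.com/andrewcousins7/adventofcode | 2023/day2/code.py | get_minimums
-- ===== SOURCE A (Python) =====
-- def get_minimums(game_list):
--     minimums = {}
--     for game in game_list:
--         for color in game:
--             if color not in minimums:
--                 minimums[color] = game[color]
--             else:
--                 if game[color] > minimums[color]:
--                     minimums[color] = game[color]
--     return minimums
-- ===== SOURCE B (Python) =====
-- def get_minimums(game_list):
--     colors = []
--     for game in game_list:
--         for c in game:
--             if c not in colors:
--                 colors.append(c)
--     return {c: max(g[c] for g in game_list if c in g) for c in colors}
-- ===== Notes on version B (the rewrite author's own statement) =====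
-- stated objective: alternative
-- what changed: Reverses the loop nesting: instead of one accumulating pass that updates a running-max dict per color, B first collects the distinct colors in first-appearance order and then computes each color's maximum by a per-color scan over the games (dict comprehension with max over the games containing the color).
import Mathlib
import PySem

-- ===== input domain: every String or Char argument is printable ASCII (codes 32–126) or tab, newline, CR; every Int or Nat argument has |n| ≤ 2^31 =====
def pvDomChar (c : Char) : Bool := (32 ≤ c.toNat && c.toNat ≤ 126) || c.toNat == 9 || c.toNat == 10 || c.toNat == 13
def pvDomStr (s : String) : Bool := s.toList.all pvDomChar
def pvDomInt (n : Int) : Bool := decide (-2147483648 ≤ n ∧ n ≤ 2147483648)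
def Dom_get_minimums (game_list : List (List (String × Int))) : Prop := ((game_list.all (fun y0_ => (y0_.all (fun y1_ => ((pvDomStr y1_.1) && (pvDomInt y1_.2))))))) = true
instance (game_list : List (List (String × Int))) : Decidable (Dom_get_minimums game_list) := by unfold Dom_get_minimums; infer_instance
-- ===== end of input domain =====

-- B reverses the loop nesting of A (colors outer, games inner): it collects the distinct
-- colors once, then computes each color's maximum by a scan over the games; an
-- alternative decomposition (O(colors * games), so slower on large inputs), not claimed faster.

-- ===== PORT A =====
-- A: one pass over the games updating a running-max dict keyed by color.
-- 'game' is a Python dict; 'for color in game' iterates its keys, 'game[color]' looks the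
-- key up (always present, so the getD default 0 is never used).
def get_minimums (game_list : List (List (String × Int))) : List (String × Int) :=
  (game_list.foldl
    (fun minimums game =>
      (game.map Prod.fst).foldl
        (fun m color =>
          match m.get? color with
          | none => m.insert color ((PySem.Dict.mk game).getD color 0)
          | some w =>
            if (PySem.Dict.mk game).getD color 0 > w then
              m.insert color ((PySem.Dict.mk game).getD color 0)
            else m)
        minimums)
    (PySem.Dict.empty : PySem.Dict String Int)).items

-- ===== PORT B =====
-- B: collect the distinct colors in first-appearance order, then map each color to
-- max(g[c] for g in game_list if c in g); the [] branch of the match is unreachable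
-- (every collected color occurs in some game).
def get_minimums_alt (game_list : List (List (String × Int))) : List (String × Int) :=
  let colors : PySem.Set String :=
    game_list.foldl
      (fun cs game => (game.map Prod.fst).foldl (fun cs c => PySem.Set.add cs c) cs) []
  colors.map (fun c =>
    (c, match game_list.filterMap (fun g => (PySem.Dict.mk g).get? c) with
        | [] => 0
        | h :: t => t.foldl max h))

-- ===== PRECONDITION & SPEC =====
def Spec_get_minimums (game_list : List (List (String × Int))) (out : List (String × Int)) : Prop := out = get_minimums_alt game_list
instance (game_list : List (List (String × Int))) (out : List (String × Int)) : Decidable (Spec_get_minimums game_list out) := by unfold Spec_get_minimums; infer_instance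

-- ===== CLAIM (what is proved, stated in full; the proofs are below) =====
def Claim_equal_get_minimums : Prop := ∀ (game_list : List (List (String × Int))), Dom_get_minimums game_list → Spec_get_minimums game_list (get_minimums game_list)

-- ===== LEMMAS AND PROOFS =====

-- A's inner update, and its reformulation as an unconditional insert.
def pvUpd (game : List (String × Int)) (m : PySem.Dict String Int) (color : String) :
    PySem.Dict String Int :=
  match m.get? color with
  | none => m.insert color ((PySem.Dict.mk game).getD color 0)
  | some w =>
    if (PySem.Dict.mk game).getD color 0 > w then
      m.insert color ((PySem.Dict.mk game).getD color 0)
    else m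

def pvF (game : List (String × Int)) (m : PySem.Dict String Int) (color : String) : Int :=
  match m.get? color with
  | none => (PySem.Dict.mk game).getD color 0
  | some w => max w ((PySem.Dict.mk game).getD color 0)

theorem insert_self_of_get? (m : PySem.Dict String Int) (c : String) (w : Int)
    (hnd : m.keys.Nodup) (h : m.get? c = some w) : m.insert c w = m := by
  apply PySem.Dict.ext
  rw [PySem.Dict.items_insert_of_contains m w (by rw [PySem.Dict.contains_eq_isSome_get?, h]; rfl)]
  conv_rhs => rw [← List.map_id m.items]
  apply List.map_congr_left
  intro p hp
  by_cases hc : p.1 = c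
  · have h2 := PySem.Dict.get?_of_mem_items (k := p.1) (v := p.2) (d := m) (by simpa using hp) hnd
    rw [hc, h] at h2
    have hp2 : p = (c, w) := by
      obtain ⟨p1, p2⟩ := p
      simp_all
    simp [hp2]
  · simp [hc]

theorem pvUpd_eq_insert (game : List (String × Int)) (m : PySem.Dict String Int)
    (c : String) (hnd : m.keys.Nodup) : pvUpd game m c = m.insert c (pvF game m c) := by
  unfold pvUpd pvF
  cases h : m.get? c with
  | none => rfl
  | some w =>
    simp only []
    split_ifs with hgt
    · rw [max_eq_right (le_of_lt hgt)]
    · rw [max_eq_left (not_lt.mp hgt), insert_self_of_get? m c w hnd h]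

theorem inner_eq_insertF (game : List (String × Int)) (ks : List String)
    (m : PySem.Dict String Int) (hnd : m.keys.Nodup) :
    ks.foldl (pvUpd game) m = ks.foldl (fun m c => m.insert c (pvF game m c)) m := by
  induction ks generalizing m with
  | nil => rfl
  | cons k t ih =>
    simp only [List.foldl_cons]
    rw [pvUpd_eq_insert game m k hnd]
    exact ih _ (PySem.Dict.nodup_keys_insert _ _ _ hnd)

theorem inner_get? (game : List (String × Int)) (ks : List String)
    (m : PySem.Dict String Int) (x : String) :
    (ks.foldl (fun m c => m.insert c (pvF game m c)) m).get? x =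
      if x ∈ ks then
        some (match m.get? x with
              | none => (PySem.Dict.mk game).getD x 0
              | some w => max w ((PySem.Dict.mk game).getD x 0))
      else m.get? x := by
  induction ks generalizing m with
  | nil => simp
  | cons k t ih =>
    simp only [List.foldl_cons, ih, PySem.Dict.get?_insert]
    by_cases hx : x = k
    · subst hx
      by_cases hm : x ∈ t
      · simp only [hm, if_pos, pvF]
        cases m.get? x <;> simp
      · simp [hm, pvF]
    · simp [hx, List.mem_cons]

theorem step_nodup (g : List (String × Int)) (m : PySem.Dict String Int)
    (hnd : m.keys.Nodup) : ((g.map Prod.fst).foldl (pvUpd g) m).keys.Nodup := by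
  rw [inner_eq_insertF g _ m hnd]
  exact PySem.Dict.nodup_keys_foldl_insert _ _ _ hnd

theorem outer_nodup (gl : List (List (String × Int))) (d : PySem.Dict String Int)
    (hnd : d.keys.Nodup) : (gl.foldl (fun m g => (g.map Prod.fst).foldl (pvUpd g) m) d).keys.Nodup := by
  induction gl generalizing d with
  | nil => exact hnd
  | cons g t ih => exact ih _ (step_nodup g d hnd)

theorem outer_keys (gl : List (List (String × Int))) (d : PySem.Dict String Int)
    (hnd : d.keys.Nodup) :
    (gl.foldl (fun m g => (g.map Prod.fst).foldl (pvUpd g) m) d).keys =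
      gl.foldl (fun cs g => (g.map Prod.fst).foldl (fun cs c => PySem.Set.add cs c) cs) d.keys := by
  induction gl generalizing d with
  | nil => rfl
  | cons g t ih =>
    simp only [List.foldl_cons]
    rw [ih _ (step_nodup g d hnd)]
    congr 1
    rw [inner_eq_insertF g _ d hnd, PySem.Dict.keys_foldl_insert]
    rfl

def pvComb (o : Option Int) (vs : List Int) : Option Int :=
  vs.foldl (fun o v => some (match o with | none => v | some w => max w v)) o

theorem mem_keys_mk_iff (g : List (String × Int)) (x : String) :
    ((PySem.Dict.mk g).get? x).isSome = true ↔ x ∈ g.map Prod.fst := by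
  rw [← PySem.Dict.contains_eq_isSome_get?]
  rw [PySem.Dict.contains_iff_mem_keys]
  rfl

theorem outer_get? (gl : List (List (String × Int))) (d : PySem.Dict String Int)
    (hnd : d.keys.Nodup) (x : String) :
    (gl.foldl (fun m g => (g.map Prod.fst).foldl (pvUpd g) m) d).get? x =
      pvComb (d.get? x) (gl.filterMap (fun g => (PySem.Dict.mk g).get? x)) := by
  induction gl generalizing d with
  | nil => rfl
  | cons g t ih =>
    simp only [List.foldl_cons, List.filterMap_cons]
    rw [ih _ (step_nodup g d hnd)]
    rw [inner_eq_insertF g _ d hnd, inner_get?]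
    cases hg : (PySem.Dict.mk g).get? x with
    | none =>
      have hnm : x ∉ g.map Prod.fst := by
        rw [← mem_keys_mk_iff, hg]; simp
      simp [hnm]
    | some v =>
      have hmem : x ∈ g.map Prod.fst := by rw [← mem_keys_mk_iff, hg]; rfl
      have hgd : (PySem.Dict.mk g).getD x 0 = v := PySem.Dict.getD_of_get?_eq_some _ 0 hg
      simp only [hmem, if_pos, hgd, pvComb, List.foldl_cons]

theorem pvComb_some (vs : List Int) (w : Int) : pvComb (some w) vs = some (vs.foldl max w) := by
  induction vs generalizing w with
  | nil => rfl
  | cons h t ih => simpa [pvComb, List.foldl_cons] using ih (max w h)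

theorem pvComb_none_cons (h : Int) (t : List Int) : pvComb none (h :: t) = some (t.foldl max h) := by
  simpa [pvComb, List.foldl_cons] using pvComb_some t h

theorem mem_colors (gl : List (List (String × Int))) (cs : PySem.Set String) (c : String) :
    c ∈ gl.foldl (fun cs g => (g.map Prod.fst).foldl (fun cs c => PySem.Set.add cs c) cs) cs ↔
      c ∈ cs ∨ ∃ g ∈ gl, c ∈ g.map Prod.fst := by
  induction gl generalizing cs with
  | nil => simp
  | cons g t ih =>
    simp only [List.foldl_cons, ih]
    have hu : ((g.map Prod.fst).foldl (fun cs c => PySem.Set.add cs c) cs : PySem.Set String)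
        = PySem.Set.update cs (g.map Prod.fst) := rfl
    rw [hu, PySem.Set.mem_update]
    simp only [List.mem_cons]
    constructor
    · rintro ((h | h) | ⟨g2, hg2, h⟩)
      · exact Or.inl h
      · exact Or.inr ⟨g, Or.inl rfl, h⟩
      · exact Or.inr ⟨g2, Or.inr hg2, h⟩
    · rintro (h | ⟨g2, (rfl | hg2), h⟩)
      · exact Or.inl (Or.inl h)
      · exact Or.inl (Or.inr h)
      · exact Or.inr ⟨g2, hg2, h⟩

-- ===== VERDICT (by name: the statement is the Claim_ definition above) =====
theorem get_minimums_spec : Claim_equal_get_minimums := by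
  intro gl _
  unfold Spec_get_minimums
  show (gl.foldl (fun m g => (g.map Prod.fst).foldl (pvUpd g) m)
        (PySem.Dict.empty : PySem.Dict String Int)).items = get_minimums_alt gl
  have hnd0 : (PySem.Dict.empty : PySem.Dict String Int).keys.Nodup := List.nodup_nil
  rw [PySem.Dict.items_eq_map_keys _ (outer_nodup gl _ hnd0) 0]
  rw [outer_keys gl _ hnd0]
  unfold get_minimums_alt
  apply List.map_congr_left
  intro c hc
  have hmem : ∃ g ∈ gl, c ∈ g.map Prod.fst := by
    rcases (mem_colors gl [] c).mp hc with h | h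
    · cases h
    · exact h
  have hne : gl.filterMap (fun g => (PySem.Dict.mk g).get? c) ≠ [] := by
    intro hnil
    obtain ⟨g, hg, hcg⟩ := hmem
    have := List.filterMap_eq_nil_iff.mp hnil g hg
    rw [← mem_keys_mk_iff, this] at hcg
    simp at hcg
  rw [PySem.Dict.getD_eq_get?_getD, outer_get? gl _ hnd0 c]
  cases hvs : gl.filterMap (fun g => (PySem.Dict.mk g).get? c) with
  | nil => exact absurd hvs hne
  | cons h t =>
    rw [show ((PySem.Dict.empty : PySem.Dict String Int).get? c) = none from rfl]
    rw [pvComb_none_cons]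
    rfl
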